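-- pv_equiv track=rewrite | github.com/sinnarasu1972-ops/Service-Intello | app.py | detect_month
-- ===== SOURCE A (Python) =====
-- from typing import Any, Dict, List, Optional, Tuple
--
-- MONTH_ORDER = ["Apr", "May", "Jun", "Jul", "Aug", "Sep", "Oct", "Nov", "Dec", "Jan", "Feb", "Mar"]
--
-- def detect_month(sheet_name: str) -> Optional[str]:
--     if not sheet_name:
--         return None
--     key = sheet_name.strip()[:3].lower()
--     for m in MONTH_ORDER:
--         if m.lower() == key:
--             return m
--     return None
-- ===== SOURCE B (Python) =====
-- _MONTHS_LOWER = "aprmayjunjulaugsepoctnovdecjanfebmar"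
-- _MONTHS_TITLE = "AprMayJunJulAugSepOctNovDecJanFebMar"
--
-- def detect_month(sheet_name):
--     if not sheet_name:
--         return None
--     key = sheet_name.strip()[:3].lower()
--     i = _MONTHS_LOWER.find(key)
--     if len(key) == 3 and i >= 0 and i % 3 == 0:
--         return _MONTHS_TITLE[i:i + 3]
--     return None
-- ===== Notes on version B (the rewrite author's own statement) =====
-- stated objective: alternative
-- what changed: B replaces A's per-month scan-and-compare loop by a single substring search of the key in one packed lowercase string 'aprmay...mar', validates the hit with index arithmetic (i % 3 == 0 and len(key) == 3), and reconstructs the canonical answer by slicing a parallel TitleCase string instead of returning the matched list element.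
import Mathlib
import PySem

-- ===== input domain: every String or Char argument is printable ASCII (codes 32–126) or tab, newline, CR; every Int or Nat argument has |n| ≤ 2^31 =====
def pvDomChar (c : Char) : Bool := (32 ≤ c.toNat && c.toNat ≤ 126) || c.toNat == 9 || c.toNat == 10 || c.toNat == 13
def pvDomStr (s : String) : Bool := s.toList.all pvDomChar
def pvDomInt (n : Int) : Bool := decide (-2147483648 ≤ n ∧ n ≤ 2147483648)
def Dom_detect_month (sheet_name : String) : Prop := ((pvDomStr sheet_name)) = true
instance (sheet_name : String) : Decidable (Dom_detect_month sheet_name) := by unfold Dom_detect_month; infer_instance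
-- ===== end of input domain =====

-- B replaces A's per-month scan by one substring search in a packed lowercase string, an index-arithmetic validity check, and a slice of a parallel TitleCase string (objective: alternative).

-- ===== PORT A =====
def MONTH_ORDER : List String :=
  ["Apr", "May", "Jun", "Jul", "Aug", "Sep", "Oct", "Nov", "Dec", "Jan", "Feb", "Mar"]

-- the 'for m in MONTH_ORDER' loop of A
def detectMonthLoop (key : String) : List String → Option String
  | [] => none
  | m :: rest => if PySem.Str.lower m = key then some m else detectMonthLoop key rest

def detect_month (sheet_name : String) : Option String :=
  if sheet_name = "" then none
  else
    let key := PySem.Str.lower (PySem.Str.slice (PySem.Str.strip sheet_name) none (some 3))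
    detectMonthLoop key MONTH_ORDER

-- ===== PORT B =====
def MONTHS_LOWER : String := "aprmayjunjulaugsepoctnovdecjanfebmar"
def MONTHS_TITLE : String := "AprMayJunJulAugSepOctNovDecJanFebMar"

def detect_month_alt (sheet_name : String) : Option String :=
  if sheet_name = "" then none
  else
    let key := PySem.Str.lower (PySem.Str.slice (PySem.Str.strip sheet_name) none (some 3))
    let i := PySem.Str.find MONTHS_LOWER key
    if PySem.Str.len key = 3 ∧ 0 ≤ i ∧ PySem.Int.mod i 3 = 0 then
      some (PySem.Str.slice MONTHS_TITLE (some i) (some (i + 3)))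
    else none

-- ===== PRECONDITION & SPEC =====
def Spec_detect_month (sheet_name : String) (out : Option String) : Prop := out = detect_month_alt sheet_name
instance (sheet_name : String) (out : Option String) : Decidable (Spec_detect_month sheet_name out) := by unfold Spec_detect_month; infer_instance

-- ===== CLAIM (what is proved, stated in full; the proofs are below) =====
def Claim_equal_detect_month : Prop := ∀ (sheet_name : String), Dom_detect_month sheet_name → Spec_detect_month sheet_name (detect_month sheet_name)

-- ===== LEMMAS AND PROOFS =====

-- core: for any key, A's scan over MONTH_ORDER equals B's find-and-slice lookup
theorem loop_eq_findSlice (k : String) :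
    detectMonthLoop k MONTH_ORDER =
      (if PySem.Str.len k = 3 ∧ 0 ≤ PySem.Str.find MONTHS_LOWER k ∧
            PySem.Int.mod (PySem.Str.find MONTHS_LOWER k) 3 = 0 then
         some (PySem.Str.slice MONTHS_TITLE (some (PySem.Str.find MONTHS_LOWER k))
                (some (PySem.Str.find MONTHS_LOWER k + 3)))
       else none) := by
  by_cases h1 : k = "apr"; · subst h1; decide
  by_cases h2 : k = "may"; · subst h2; decide
  by_cases h3 : k = "jun"; · subst h3; decide
  by_cases h4 : k = "jul"; · subst h4; decide
  by_cases h5 : k = "aug"; · subst h5; decide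
  by_cases h6 : k = "sep"; · subst h6; decide
  by_cases h7 : k = "oct"; · subst h7; decide
  by_cases h8 : k = "nov"; · subst h8; decide
  by_cases h9 : k = "dec"; · subst h9; decide
  by_cases h10 : k = "jan"; · subst h10; decide
  by_cases h11 : k = "feb"; · subst h11; decide
  by_cases h12 : k = "mar"; · subst h12; decide
  have hLHS : detectMonthLoop k MONTH_ORDER = none := by
    simp only [MONTH_ORDER, detectMonthLoop,
      show PySem.Str.lower "Apr" = "apr" from by decide,
      show PySem.Str.lower "May" = "may" from by decide,
      show PySem.Str.lower "Jun" = "jun" from by decide,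
      show PySem.Str.lower "Jul" = "jul" from by decide,
      show PySem.Str.lower "Aug" = "aug" from by decide,
      show PySem.Str.lower "Sep" = "sep" from by decide,
      show PySem.Str.lower "Oct" = "oct" from by decide,
      show PySem.Str.lower "Nov" = "nov" from by decide,
      show PySem.Str.lower "Dec" = "dec" from by decide,
      show PySem.Str.lower "Jan" = "jan" from by decide,
      show PySem.Str.lower "Feb" = "feb" from by decide,
      show PySem.Str.lower "Mar" = "mar" from by decide]
    simp [Ne.symm h1, Ne.symm h2, Ne.symm h3, Ne.symm h4, Ne.symm h5, Ne.symm h6,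
      Ne.symm h7, Ne.symm h8, Ne.symm h9, Ne.symm h10, Ne.symm h11, Ne.symm h12]
  rw [hLHS, if_neg]
  rintro ⟨hlen, hpos, hmod⟩
  have hfind : PySem.Str.find MONTHS_LOWER k = PySem.Chars.find MONTHS_LOWER.toList k.toList := by
    simp
  rw [hfind] at hpos hmod
  have hklen : k.toList.length = 3 := by
    have h := hlen
    simp at h
    rw [String.length_toList]
    exact_mod_cast h
  have hpre : k.toList <+: (MONTHS_LOWER.toList).drop (PySem.Chars.find MONTHS_LOWER.toList k.toList).toNat :=
    (PySem.Chars.find_spec hpos).1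
  have hle : PySem.Chars.find MONTHS_LOWER.toList k.toList ≤ 36 := by
    have h := PySem.Chars.find_le_length (s := MONTHS_LOWER.toList) (sub := k.toList)
    have h36 : (MONTHS_LOWER.toList).length = 36 := by decide
    omega
  obtain ⟨m, hm⟩ := (PySem.Int.mod_eq_zero_iff_dvd _ 3).mp hmod
  have hkeq : k.toList =
      ((MONTHS_LOWER.toList).drop (PySem.Chars.find MONTHS_LOWER.toList k.toList).toNat).take 3 := by
    have h := List.prefix_iff_eq_take.mp hpre
    rwa [hklen] at h
  have hcases : (PySem.Chars.find MONTHS_LOWER.toList k.toList).toNat = 0 ∨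
      (PySem.Chars.find MONTHS_LOWER.toList k.toList).toNat = 3 ∨
      (PySem.Chars.find MONTHS_LOWER.toList k.toList).toNat = 6 ∨
      (PySem.Chars.find MONTHS_LOWER.toList k.toList).toNat = 9 ∨
      (PySem.Chars.find MONTHS_LOWER.toList k.toList).toNat = 12 ∨
      (PySem.Chars.find MONTHS_LOWER.toList k.toList).toNat = 15 ∨
      (PySem.Chars.find MONTHS_LOWER.toList k.toList).toNat = 18 ∨
      (PySem.Chars.find MONTHS_LOWER.toList k.toList).toNat = 21 ∨
      (PySem.Chars.find MONTHS_LOWER.toList k.toList).toNat = 24 ∨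
      (PySem.Chars.find MONTHS_LOWER.toList k.toList).toNat = 27 ∨
      (PySem.Chars.find MONTHS_LOWER.toList k.toList).toNat = 30 ∨
      (PySem.Chars.find MONTHS_LOWER.toList k.toList).toNat = 33 ∨
      (PySem.Chars.find MONTHS_LOWER.toList k.toList).toNat = 36 := by omega
  rcases hcases with h | h | h | h | h | h | h | h | h | h | h | h | h <;> rw [h] at hkeq
  · exact h1 (String.toList_inj.mp (hkeq.trans (by decide)))
  · exact h2 (String.toList_inj.mp (hkeq.trans (by decide)))
  · exact h3 (String.toList_inj.mp (hkeq.trans (by decide)))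
  · exact h4 (String.toList_inj.mp (hkeq.trans (by decide)))
  · exact h5 (String.toList_inj.mp (hkeq.trans (by decide)))
  · exact h6 (String.toList_inj.mp (hkeq.trans (by decide)))
  · exact h7 (String.toList_inj.mp (hkeq.trans (by decide)))
  · exact h8 (String.toList_inj.mp (hkeq.trans (by decide)))
  · exact h9 (String.toList_inj.mp (hkeq.trans (by decide)))
  · exact h10 (String.toList_inj.mp (hkeq.trans (by decide)))
  · exact h11 (String.toList_inj.mp (hkeq.trans (by decide)))
  · exact h12 (String.toList_inj.mp (hkeq.trans (by decide)))
  · have h0 : k.toList.length = 0 := by rw [hkeq]; decide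
    omega

-- ===== VERDICT (by name: the statement is the Claim_ definition above) =====
theorem detect_month_spec : Claim_equal_detect_month := by
  intro s _hdom
  unfold Spec_detect_month detect_month detect_month_alt
  by_cases hs : s = ""
  · simp [hs]
  · simp only [if_neg hs]
    exact loop_eq_findSlice _
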